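-- pv_equiv track=rewrite | github.com/daniel-reich/ubiquitous-fiesta | ke4FSMdG2XYxbGQny_10.py | even_odd_transform
-- ===== SOURCE A (Python) =====
-- def even_odd_transform(lst, n):
--   for i in range(n):
--     for j in range(len(lst)):
--       if lst[j] % 2:
--         lst[j] += 2
--       else:
--         lst[j] -= 2
--   return lst
-- ===== SOURCE B (Python) =====
-- def even_odd_transform(lst, n):
--   # One pass: parity is invariant under +-2, so each odd gains 2 per
--   # iteration and each even loses 2 per iteration; n <= 0 means no passes.
--   # (A mutates lst in place; B returns a new list -- equivalence is about
--   # the return value only.)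
--   m = 2 * max(n, 0)
--   return [x + m if x % 2 else x - m for x in lst]
-- ===== Notes on version B (the rewrite author's own statement) =====
-- stated objective: faster
-- what changed: Replaces the n passes of +-2 updates by a single map using the parity invariant: odd elements get +2n, even elements get -2n (no change for n<=0).
import Mathlib
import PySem

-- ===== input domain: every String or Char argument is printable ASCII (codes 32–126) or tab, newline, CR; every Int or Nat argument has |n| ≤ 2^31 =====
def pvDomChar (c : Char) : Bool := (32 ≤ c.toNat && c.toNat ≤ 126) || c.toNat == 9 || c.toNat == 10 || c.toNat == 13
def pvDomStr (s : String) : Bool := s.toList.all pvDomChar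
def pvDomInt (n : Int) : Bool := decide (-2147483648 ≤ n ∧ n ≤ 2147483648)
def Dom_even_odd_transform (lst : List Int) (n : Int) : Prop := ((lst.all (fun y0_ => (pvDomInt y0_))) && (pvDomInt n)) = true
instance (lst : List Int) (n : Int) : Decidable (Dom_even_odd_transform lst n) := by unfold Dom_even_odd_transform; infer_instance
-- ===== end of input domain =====

-- B replaces A's n sweeps of ±2 by one map adding 2·max(n,0) to odds and
-- subtracting it from evens (parity is invariant under ±2); A mutates lst in
-- place — the equivalence proved here is about the return value only.

-- ===== PORT A =====
-- inner body: 'if lst[j] % 2: lst[j] += 2 else: lst[j] -= 2' (j is always in range)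
def pvStepA (a : List Int) (j : Int) : List Int :=
  let v := PySem.List.pyGetD a j 0
  if PySem.Int.mod v 2 ≠ 0 then PySem.List.pySetD a j (v + 2)
  else PySem.List.pySetD a j (v - 2)

def even_odd_transform (lst : List Int) (n : Int) : List Int :=
  (PySem.List.pyRange 0 n 1).foldl
    (fun acc _ => (PySem.List.pyRange 0 (acc.length : Int) 1).foldl pvStepA acc)
    lst

-- ===== PORT B =====
def even_odd_transform_alt (lst : List Int) (n : Int) : List Int :=
  let m := 2 * max n 0
  lst.map (fun x => if PySem.Int.mod x 2 ≠ 0 then x + m else x - m)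

-- ===== PRECONDITION & SPEC =====
def Spec_even_odd_transform (lst : List Int) (n : Int) (out : List Int) : Prop := out = even_odd_transform_alt lst n
instance (lst : List Int) (n : Int) (out : List Int) : Decidable (Spec_even_odd_transform lst n out) := by unfold Spec_even_odd_transform; infer_instance

-- ===== CLAIM (what is proved, stated in full; the proofs are below) =====
def Claim_equal_even_odd_transform : Prop := ∀ (lst : List Int) (n : Int), Dom_even_odd_transform lst n → Spec_even_odd_transform lst n (even_odd_transform lst n)

-- ===== LEMMAS AND PROOFS =====

-- one ±2 step on a single value
def pvBump (x : Int) : Int := if PySem.Int.mod x 2 ≠ 0 then x + 2 else x - 2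

-- the closed form after m passes
def pvG (m : Int) (x : Int) : Int :=
  if PySem.Int.mod x 2 ≠ 0 then x + 2 * m else x - 2 * m

lemma pvBump_g (m : Int) (x : Int) : pvBump (pvG m x) = pvG (m + 1) x := by
  simp only [pvBump, pvG, PySem.Int.mod_eq_emod_of_pos (by omega : (0:Int) < 2)]
  by_cases h : x % 2 = 0 <;> simp [h] <;> omega

-- one inner sweep (indices k..len) on a list whose first k slots are done
lemma pv_inner_aux (c : Nat) : ∀ (k : Nat) (xs : List Int), xs.length - k = c → k ≤ xs.length →
    (PySem.List.pyRange (k : Int) (xs.length : Int) 1).foldl pvStepA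
      ((xs.take k).map pvBump ++ xs.drop k) = xs.map pvBump := by
  induction c with
  | zero =>
    intro k xs hc hk
    have hlen : k = xs.length := by omega
    subst hlen
    rw [PySem.List.pyRange_one_eq_nil (by omega)]
    simp
  | succ c ih =>
    intro k xs hc hk
    have hklt : k < xs.length := by omega
    rw [PySem.List.pyRange_one_cons (by exact_mod_cast hklt)]
    simp only [List.foldl_cons]
    have hstep : pvStepA ((xs.take k).map pvBump ++ xs.drop k) (k : Int)
        = (xs.take (k+1)).map pvBump ++ xs.drop (k+1) := by
      have hget : PySem.List.pyGetD ((xs.take k).map pvBump ++ xs.drop k) (k : Int) 0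
          = xs[k]'hklt := by
        rw [PySem.List.pyGetD_natCast]
        rw [List.getD_eq_getElem?_getD, List.getElem?_append_right (by simp [Nat.min_eq_left hk])]
        simp [Nat.min_eq_left (le_of_lt hklt), List.getElem?_drop, List.getElem?_eq_getElem hklt]
      have hset : ∀ v : Int, PySem.List.pySetD ((xs.take k).map pvBump ++ xs.drop k) (k : Int) v
          = (xs.take k).map pvBump ++ [v] ++ xs.drop (k+1) := by
        intro v
        rw [PySem.List.pySetD_natCast]
        rw [List.set_append_right _ _ (by simp [Nat.min_eq_left hk])]
        have hdrop : xs.drop k = xs[k]'hklt :: xs.drop (k+1) := List.drop_eq_getElem_cons hklt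
        simp only [List.length_map, List.length_take, Nat.min_eq_left hk, Nat.sub_self, hdrop,
          List.set_cons_zero, List.append_assoc, List.singleton_append]
      have htake : xs.take (k+1) = xs.take k ++ [xs[k]'hklt] := by
        rw [List.take_add_one]; simp [List.getElem?_eq_getElem hklt]
      simp only [pvStepA, hget, hset, htake, List.map_append, List.map_cons, List.map_nil,
        pvBump, PySem.Int.mod_eq_emod_of_pos (show (0:Int) < 2 by omega)]
      split_ifs <;> simp
    rw [hstep]
    have hx : ((k : Int) + 1) = ((k + 1 : Nat) : Int) := by push_cast; ring
    rw [hx]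
    exact ih (k + 1) xs (by omega) (by omega)

lemma pv_inner (xs : List Int) :
    (PySem.List.pyRange 0 (xs.length : Int) 1).foldl pvStepA xs = xs.map pvBump := by
  have := pv_inner_aux xs.length 0 xs (by omega) (by omega)
  simpa using this

-- the outer loop: m passes give pvG m
lemma pv_outer (m : Nat) (lst : List Int) :
    (PySem.List.pyRange 0 (m : Int) 1).foldl
      (fun acc _ => (PySem.List.pyRange 0 (acc.length : Int) 1).foldl pvStepA acc) lst
    = lst.map (pvG m) := by
  induction m with
  | zero =>
    rw [PySem.List.pyRange_one_eq_nil (by omega)]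
    simp only [List.foldl_nil]
    have h0 : ∀ x : Int, pvG 0 x = x := by
      intro x; simp only [pvG]; split_ifs <;> ring
    simp only [Nat.cast_zero]
    rw [show List.map (pvG 0) lst = List.map id lst from
      List.map_congr_left fun x _ => h0 x, List.map_id]
  | succ m ih =>
    have hx : ((m + 1 : Nat) : Int) = (m : Int) + 1 := by push_cast; ring
    rw [hx, PySem.List.pyRange_one_succ_right (by omega)]
    rw [List.foldl_append, ih]
    simp only [List.foldl_cons, List.foldl_nil]
    rw [pv_inner]
    rw [List.map_map]
    congr 1
    funext x
    have := pvBump_g (m : Int) x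
    simpa [Function.comp, hx] using this

-- ===== VERDICT (by name: the statement is the Claim_ definition above) =====
theorem even_odd_transform_spec : Claim_equal_even_odd_transform := by
  intro lst n _
  unfold Spec_even_odd_transform even_odd_transform even_odd_transform_alt
  by_cases hn : 0 ≤ n
  · have hn' : n = ((n.toNat : Nat) : Int) := by omega
    rw [hn', pv_outer]
    have hmax : max (((n.toNat : Nat) : Int)) 0 = ((n.toNat : Nat) : Int) := by omega
    simp only [hmax]
    rfl
  · rw [PySem.List.pyRange_one_eq_nil (by omega)]
    simp only [List.foldl_nil]
    have hmax : max n 0 = 0 := by omega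
    rw [hmax]
    have : ∀ x : Int, (if PySem.Int.mod x 2 ≠ 0 then x + 2 * 0 else x - 2 * 0) = x := by
      intro x; split_ifs <;> ring
    simp only [this, List.map_id']
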